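-- pv_equiv track=rewrite | github.com/5pponent/opponent | greedy&simulation/숫자 게임.py | solution
-- ===== SOURCE A (Python) =====
-- def solution(A, B):
--     answer = 0
--     A.sort()
--     B.sort()
--
--     for i in A:
--         while B:
--             if B.pop(0) > i:
--                 answer += 1
--                 break
--
--     return answer
-- ===== SOURCE B (Python) =====
-- def solution(A, B):
--     # Return-value equivalent to A (A sorts A and B in place and empties B; B does not mutate).
--     a = sorted(A)
--     b = sorted(B)
--     ans = 0
--     j = 0
--     n = len(b)
--     for x in a:
--         while j < n and b[j] <= x:
--             j += 1
--         if j < n: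
--             ans += 1
--             j += 1
--     return ans
-- ===== Notes on version B (the rewrite author's own statement) =====
-- stated objective: faster
-- what changed: replaces the destructive B.pop(0) scan with a single two-pointer index over the sorted copies, so no element is ever shifted or re-scanned
import Mathlib
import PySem

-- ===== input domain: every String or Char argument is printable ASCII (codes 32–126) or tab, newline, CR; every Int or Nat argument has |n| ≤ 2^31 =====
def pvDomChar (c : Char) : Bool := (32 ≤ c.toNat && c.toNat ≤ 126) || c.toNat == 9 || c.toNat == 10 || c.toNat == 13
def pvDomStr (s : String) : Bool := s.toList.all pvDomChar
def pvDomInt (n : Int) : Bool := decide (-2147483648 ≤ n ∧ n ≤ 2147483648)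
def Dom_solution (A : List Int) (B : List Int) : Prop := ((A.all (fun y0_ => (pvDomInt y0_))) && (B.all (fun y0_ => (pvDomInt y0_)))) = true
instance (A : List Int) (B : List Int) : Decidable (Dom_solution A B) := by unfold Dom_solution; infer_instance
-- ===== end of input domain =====

-- ===== PORT A =====
-- B is returns-the-same-value but faster: two-pointer index over sorted copies instead of
-- repeated B.pop(0) (equivalence is about the RETURN value; Python A sorts A,B in place and empties B).

-- while B: if B.pop(0) > i: answer += 1; break
def popLoop (i : Int) : List Int → Bool × List Int
  | [] => (false, [])
  | x :: rest => if x > i then (true, rest) else popLoop i rest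

def solution (A : List Int) (B : List Int) : Int :=
  let As := PySem.List.sorted A (fun x => x) false
  let Bs := PySem.List.sorted B (fun x => x) false
  let st := As.foldl (fun (s : Int × List Int) i =>
      let r := popLoop i s.2
      if r.1 then (s.1 + 1, r.2) else (s.1, r.2)) (0, Bs)
  st.1

-- ===== PORT B =====
-- while j < n and b[j] <= x: j += 1
def skipLE (b : List Int) (x : Int) (j : Nat) : Nat :=
  if h : j < b.length then
    if b[j] ≤ x then skipLE b x (j + 1) else j
  else j
termination_by b.length - j

def solution_alt (A : List Int) (B : List Int) : Int :=
  let a := PySem.List.sorted A (fun x => x) false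
  let b := PySem.List.sorted B (fun x => x) false
  let st := a.foldl (fun (s : Int × Nat) x =>
      let j := skipLE b x s.2
      if j < b.length then (s.1 + 1, j + 1) else (s.1, j)) (0, 0)
  st.1

-- ===== PRECONDITION & SPEC =====
def Spec_solution (A : List Int) (B : List Int) (out : Int) : Prop := out = solution_alt A B
instance (A : List Int) (B : List Int) (out : Int) : Decidable (Spec_solution A B out) := by unfold Spec_solution; infer_instance

-- ===== CLAIM (what is proved, stated in full; the proofs are below) =====
def Claim_equal_solution : Prop := ∀ (A : List Int) (B : List Int), Dom_solution A B → Spec_solution A B (solution A B)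

-- ===== LEMMAS AND PROOFS =====

theorem skipLE_le (b : List Int) (x : Int) (j : Nat) (h : j ≤ b.length) :
    skipLE b x j ≤ b.length := by
  induction j using skipLE.induct (b := b) (x := x) with
  | case1 j h1 h2 ih => rw [skipLE]; simp [h1, h2]; exact ih (by omega)
  | case2 j h1 h2 => rw [skipLE]; simp [h1, h2]; omega
  | case3 j h1 => rw [skipLE]; simp [h1]; exact h

theorem popLoop_drop (b : List Int) (x : Int) (j : Nat) (h : j ≤ b.length) :
    popLoop x (b.drop j) =
      (if skipLE b x j < b.length then (true, b.drop (skipLE b x j + 1))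
       else (false, b.drop (skipLE b x j))) := by
  induction j using skipLE.induct (b := b) (x := x) with
  | case1 j h1 h2 ih =>
      rw [skipLE]
      simp only [h1, h2, dif_pos, if_pos]
      rw [List.drop_eq_getElem_cons h1, popLoop]
      simp only [show ¬(b[j] > x) by omega, if_neg, not_false_iff]
      simpa using ih (by omega)
  | case2 j h1 h2 =>
      rw [skipLE]
      simp only [h1, h2, dif_pos, if_neg, not_false_iff]
      rw [List.drop_eq_getElem_cons h1, popLoop]
      simp [show b[j] > x by omega]
  | case3 j h1 =>
      rw [skipLE]
      have hj : j = b.length := by omega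
      simp [hj, popLoop]

theorem fold_agree (b : List Int) (a : List Int) (ans : Int) (j : Nat) (h : j ≤ b.length) :
    (a.foldl (fun (s : Int × List Int) i =>
        let r := popLoop i s.2
        if r.1 then (s.1 + 1, r.2) else (s.1, r.2)) (ans, b.drop j)).1
    = (a.foldl (fun (s : Int × Nat) x =>
        let j := skipLE b x s.2
        if j < b.length then (s.1 + 1, j + 1) else (s.1, j)) (ans, j)).1 := by
  induction a generalizing ans j with
  | nil => simp
  | cons x as ih =>
      simp only [List.foldl_cons]
      rw [popLoop_drop b x j h]
      by_cases hlt : skipLE b x j < b.length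
      · simp only [hlt, if_pos]
        exact ih (ans + 1) (skipLE b x j + 1) (by omega)
      · simp only [hlt, if_neg, not_false_iff]
        exact ih ans (skipLE b x j) (skipLE_le b x j h)

-- ===== VERDICT (by name: the statement is the Claim_ definition above) =====
theorem solution_spec : Claim_equal_solution := by
  intro A B _
  unfold Spec_solution solution solution_alt
  simpa using fold_agree (PySem.List.sorted B (fun x => x) false)
    (PySem.List.sorted A (fun x => x) false) 0 0 (Nat.zero_le _)
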